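-- pv_equiv track=rewrite | github.com/ReticentDay/InformationSecurityProject | mysite/SDES.py | ComputeK1
-- ===== SOURCE A (Python) =====
-- P8 = [6,3,7,4,8,5,10,9]
--
-- def Shift(ori_key: list, count: int):
-- 	tempKey = []
-- 	for i in ori_key:
-- 		tempKey.append(i)
-- 	half = int(len(ori_key) / 2)
-- 	for i in range(1,count + 1):
-- 		temp = tempKey[0]
-- 		for item in range(1, half):
-- 			tempKey[item - 1] = tempKey[item]
-- 		tempKey[half - 1] = temp
-- 		temp = tempKey[half]
-- 		for item in range(half + 1, len(ori_key)):
-- 			tempKey[item - 1] = tempKey[item]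
-- 		tempKey[len(ori_key) - 1] = temp
-- 	return tempKey
--
-- def ComputeK1(ori_key: list):
-- 	tempKey = [0,0,0,0,0,0,0,0]
-- 	ori_key = Shift(ori_key, 1)
-- 	position = 0
-- 	for i in P8:
-- 		tempKey[position] = ori_key[i-1]
-- 		position += 1
-- 	return tempKey
-- ===== SOURCE B (Python) =====
-- P8 = [6,3,7,4,8,5,10,9]
--
-- def ComputeK1(ori_key: list):
-- 	# For each output bit, compute the single source index in the ORIGINAL key:
-- 	# the left-rotate-by-one of each half means rotated position p came from p+1,
-- 	# except the last position of each half, which came from that half's first.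
-- 	half = len(ori_key) // 2
--
-- 	def src(p):
-- 		if p == half - 1:
-- 			return 0
-- 		if p == len(ori_key) - 1:
-- 			return half
-- 		return p + 1
--
-- 	return [ori_key[src(i - 1)] for i in P8]
-- ===== Notes on version B (the rewrite author's own statement) =====
-- stated objective: simpler
-- what changed: Instead of copying the key and rotating both halves in place before applying P8, B composes P8 with the inverse of the half-rotation and reads each of the 8 output bits directly from the original key in a single comprehension.
-- outside the precondition, e.g. on ComputeK1([1, 0, 1, 0, 0, 0, 1, 1, 1]): A raises IndexError, B raises IndexError
import Mathlib
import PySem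

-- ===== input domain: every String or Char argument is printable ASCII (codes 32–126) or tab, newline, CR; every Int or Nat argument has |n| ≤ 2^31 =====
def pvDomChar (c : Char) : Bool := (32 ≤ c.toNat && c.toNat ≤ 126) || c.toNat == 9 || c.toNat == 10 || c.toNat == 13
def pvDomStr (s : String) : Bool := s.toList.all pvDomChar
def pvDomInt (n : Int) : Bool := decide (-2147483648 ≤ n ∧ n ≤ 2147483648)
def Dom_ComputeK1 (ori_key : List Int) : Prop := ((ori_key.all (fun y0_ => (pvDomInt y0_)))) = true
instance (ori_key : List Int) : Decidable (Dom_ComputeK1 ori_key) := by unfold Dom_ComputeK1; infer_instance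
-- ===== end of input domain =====

-- B replaces A's copy-and-rotate pass by composing P8 with the inverse of the
-- half-rotation, reading each output bit straight from the original key (simpler).

-- ===== PORT A =====
def pvP8 : List Int := [6, 3, 7, 4, 8, 5, 10, 9]

-- literal port of Shift(ori_key, count)
def pvShift (ori_key : List Int) (count : Int) : List Int :=
  let tempKey := ori_key.foldl (fun acc i => acc ++ [i]) []
  let half : Int := PySem.Int.floordiv (ori_key.length : Int) 2
  (PySem.List.pyRange 1 (count + 1) 1).foldl (fun tempKey _ =>
    let temp := PySem.List.pyGetD tempKey 0 (0 : Int)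
    let tempKey := (PySem.List.pyRange 1 half 1).foldl
      (fun tk item => PySem.List.pySetD tk (item - 1) (PySem.List.pyGetD tk item (0 : Int))) tempKey
    let tempKey := PySem.List.pySetD tempKey (half - 1) temp
    let temp := PySem.List.pyGetD tempKey half (0 : Int)
    let tempKey := (PySem.List.pyRange (half + 1) (ori_key.length : Int) 1).foldl
      (fun tk item => PySem.List.pySetD tk (item - 1) (PySem.List.pyGetD tk item (0 : Int))) tempKey
    PySem.List.pySetD tempKey ((ori_key.length : Int) - 1) temp) tempKey

def ComputeK1 (ori_key : List Int) : List Int :=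
  let tempKey : List Int := [0, 0, 0, 0, 0, 0, 0, 0]
  let ori_key := pvShift ori_key 1
  let st := pvP8.foldl (fun (st : List Int × Int) i =>
    (PySem.List.pySetD st.1 st.2 (PySem.List.pyGetD ori_key (i - 1) (0 : Int)), st.2 + 1))
    (tempKey, 0)
  st.1

-- ===== PORT B =====
-- src maps a position of the half-rotated key back to its source position in the original
def pvSrc (n half p : Int) : Int :=
  if p = half - 1 then 0 else if p = n - 1 then half else p + 1

def ComputeK1_alt (ori_key : List Int) : List Int :=
  let half : Int := PySem.Int.floordiv (ori_key.length : Int) 2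
  pvP8.map (fun i =>
    PySem.List.pyGetD ori_key (pvSrc (ori_key.length : Int) half (i - 1)) (0 : Int))

-- ===== PRECONDITION & SPEC =====
-- A indexes the shifted key at the fixed P8 positions up to 10, so it raises IndexError
-- whenever the key has fewer than 10 elements; Pre_ excludes exactly those inputs.
def Pre_ComputeK1 (ori_key : List Int) : Prop := 10 ≤ ori_key.length
instance (ori_key : List Int) : Decidable (Pre_ComputeK1 ori_key) := by unfold Pre_ComputeK1; infer_instance

def pvWitness_ComputeK1 : List Int := [1, 0, 1, 0, 0, 0, 1, 1, 1, 0]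

def Spec_ComputeK1 (ori_key : List Int) (out : List Int) : Prop := out = ComputeK1_alt ori_key
instance (ori_key : List Int) (out : List Int) : Decidable (Spec_ComputeK1 ori_key out) := by unfold Spec_ComputeK1; infer_instance

-- ===== CLAIM (what is proved, stated in full; the proofs are below) =====
def Claim_equal_ComputeK1 : Prop := ∀ (ori_key : List Int), Dom_ComputeK1 ori_key → Pre_ComputeK1 ori_key → Spec_ComputeK1 ori_key (ComputeK1 ori_key)

-- ===== LEMMAS AND PROOFS =====

-- the in-place left-shift segment loop `for item in range(a, b): tk[item-1] = tk[item]`,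
-- characterised pointwise: positions a-1 .. b-2 take their right neighbour, others unchanged
theorem pv_segFold (a : Nat) (ha : 1 ≤ a) (b : Nat) (xs : List Int) (hb : b ≤ xs.length) :
    ((PySem.List.pyRange (a : Int) (b : Int) 1).foldl
      (fun tk item => PySem.List.pySetD tk (item - 1) (PySem.List.pyGetD tk item (0 : Int))) xs).length = xs.length ∧
    ∀ k : Nat,
      ((PySem.List.pyRange (a : Int) (b : Int) 1).foldl
        (fun tk item => PySem.List.pySetD tk (item - 1) (PySem.List.pyGetD tk item (0 : Int))) xs).getD k 0 =
      if a - 1 ≤ k ∧ k + 1 < b then xs.getD (k + 1) 0 else xs.getD k 0 := by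
  rcases Nat.lt_or_ge b a with hab | hab
  · rw [PySem.List.pyRange_one_eq_nil (by exact_mod_cast hab.le), List.foldl_nil]
    refine ⟨rfl, fun k => ?_⟩
    rw [if_neg (by omega)]
  · induction b, hab using Nat.le_induction with
    | base =>
      rw [PySem.List.pyRange_one_eq_nil le_rfl, List.foldl_nil]
      refine ⟨rfl, fun k => ?_⟩
      rw [if_neg (by omega)]
    | succ b hab ih =>
      obtain ⟨hlen, hget⟩ := ih (by omega)
      rw [show ((b + 1 : Nat) : Int) = (b : Int) + 1 by push_cast; ring,
        PySem.List.pyRange_one_succ_right (by exact_mod_cast hab), List.foldl_append,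
        List.foldl_cons, List.foldl_nil]
      set F := (PySem.List.pyRange (a : Int) (b : Int) 1).foldl
        (fun tk item => PySem.List.pySetD tk (item - 1) (PySem.List.pyGetD tk item (0 : Int))) xs with hF
      rw [show ((b : Int) - 1) = ((b - 1 : Nat) : Int) by omega, PySem.List.pySetD_natCast,
        PySem.List.pyGetD_natCast]
      have hv : F.getD b 0 = xs.getD b 0 := by
        rw [hget b, if_neg (by omega)]
      rw [hv]
      refine ⟨by rw [List.length_set, hlen], fun k => ?_⟩
      rw [List.getD_eq_getElem?_getD, List.getElem?_set]
      by_cases hk : b - 1 = k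
      · have hin : b - 1 < F.length := by omega
        rw [if_pos hk, if_pos (hk ▸ hin), Option.getD_some, if_pos (by omega),
          show k + 1 = b by omega]
      · rw [if_neg hk, ← List.getD_eq_getElem?_getD, hget k,
          if_congr (show (a - 1 ≤ k ∧ k + 1 < b) ↔ (a - 1 ≤ k ∧ k + 1 < b + 1) by omega) rfl rfl]

-- pointwise characterisation of the shifted key built by pvShift … 1
theorem pv_shift_get (ori : List Int) (hlen : 10 ≤ ori.length) (k : Nat) :
    (pvShift ori 1).getD k 0 =
      (if k = ori.length / 2 - 1 then ori.getD 0 0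
       else if k = ori.length - 1 then ori.getD (ori.length / 2) 0
       else ori.getD (k + 1) 0) := by
  have hhalf : PySem.Int.floordiv ((ori.length : Nat) : Int) 2 = ((ori.length / 2 : Nat) : Int) := by
    exact_mod_cast PySem.Int.floordiv_natCast ori.length 2
  unfold pvShift
  simp only [PySem.List.foldl_append_singleton, List.nil_append, hhalf,
    PySem.List.pyRange_one_singleton, List.foldl_cons, List.foldl_nil, PySem.List.pyGetD_zero]
  have hH5 : 5 ≤ ori.length / 2 := by omega
  -- first segment: range(1, half) on ori
  obtain ⟨hlen1, hget1⟩ := pv_segFold 1 le_rfl (ori.length / 2) ori (by omega)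
  rw [Nat.cast_one] at hlen1 hget1
  set T1 := (PySem.List.pyRange (1 : Int) ((ori.length / 2 : Nat) : Int) 1).foldl
    (fun tk item => PySem.List.pySetD tk (item - 1) (PySem.List.pyGetD tk item (0 : Int))) ori with hT1
  -- tempKey[half-1] = temp
  rw [show ((ori.length / 2 : Nat) : Int) - 1 = ((ori.length / 2 - 1 : Nat) : Int) by omega,
    PySem.List.pySetD_natCast]
  set T2 := T1.set (ori.length / 2 - 1) (ori.getD 0 0) with hT2
  have hlen2 : T2.length = ori.length := by rw [hT2, List.length_set, hlen1]
  have hget2 : ∀ k : Nat, T2.getD k 0 = if k = ori.length / 2 - 1 then ori.getD 0 0 else T1.getD k 0 := by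
    intro k
    rw [hT2, List.getD_eq_getElem?_getD, List.getElem?_set]
    by_cases hk : ori.length / 2 - 1 = k
    · rw [if_pos hk, if_pos (by omega), Option.getD_some, if_pos hk.symm]
    · rw [if_neg hk, ← List.getD_eq_getElem?_getD, if_neg (fun h => hk h.symm)]
  -- temp = tempKey[half]
  rw [PySem.List.pyGetD_natCast]
  have htemp2 : T2.getD (ori.length / 2) 0 = ori.getD (ori.length / 2) 0 := by
    rw [hget2 _, if_neg (by omega), hget1 _, if_neg (by omega)]
  rw [htemp2]
  -- second segment: range(half+1, L) on T2
  obtain ⟨hlen3, hget3⟩ := pv_segFold (ori.length / 2 + 1) (by omega) ori.length T2 (by omega)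
  rw [Nat.cast_add, Nat.cast_one] at hlen3 hget3
  rw [hlen2] at hlen3
  set T3 := (PySem.List.pyRange (((ori.length / 2 : Nat) : Int) + 1) ((ori.length : Nat) : Int) 1).foldl
    (fun tk item => PySem.List.pySetD tk (item - 1) (PySem.List.pyGetD tk item (0 : Int))) T2 with hT3
  -- tempKey[L-1] = temp
  rw [show ((ori.length : Nat) : Int) - 1 = ((ori.length - 1 : Nat) : Int) by omega,
    PySem.List.pySetD_natCast]
  rw [List.getD_eq_getElem?_getD, List.getElem?_set]
  by_cases hk : ori.length - 1 = k
  · rw [if_pos hk, if_pos (by omega), Option.getD_some, if_neg (by omega), if_pos hk.symm]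
  · rw [if_neg hk, ← List.getD_eq_getElem?_getD, hget3 k]
    simp only [hget2, hget1]
    split_ifs <;> first
      | rfl
      | (exfalso; omega)
      | (rw [List.getD_eq_default _ _ (by omega), List.getD_eq_default _ _ (by omega)])

-- one output bit of port A equals the corresponding direct read of port B
theorem pv_bit (ori : List Int) (hlen : 10 ≤ ori.length) (j : Nat) (hj2 : 2 ≤ j) (hj9 : j ≤ 9) :
    (pvShift ori 1).getD j 0 =
      PySem.List.pyGetD ori
        (pvSrc (ori.length : Int) (PySem.Int.floordiv (ori.length : Int) 2) (j : Int)) 0 := by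
  have hhalf : PySem.Int.floordiv ((ori.length : Nat) : Int) 2 = ((ori.length / 2 : Nat) : Int) := by
    exact_mod_cast PySem.Int.floordiv_natCast ori.length 2
  rw [pv_shift_get ori hlen j, hhalf]
  unfold pvSrc
  have hH5 : 5 ≤ ori.length / 2 := by omega
  by_cases h1 : j = ori.length / 2 - 1
  · rw [if_pos h1, if_pos (show ((j : Nat) : Int) = ((ori.length / 2 : Nat) : Int) - 1 by omega),
      show (0 : Int) = ((0 : Nat) : Int) from rfl, PySem.List.pyGetD_natCast]
  · rw [if_neg h1, if_neg (show ¬((j : Nat) : Int) = ((ori.length / 2 : Nat) : Int) - 1 by omega)]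
    by_cases h2 : j = ori.length - 1
    · rw [if_pos h2, if_pos (show ((j : Nat) : Int) = ((ori.length : Nat) : Int) - 1 by omega),
        PySem.List.pyGetD_natCast]
    · rw [if_neg h2, if_neg (show ¬((j : Nat) : Int) = ((ori.length : Nat) : Int) - 1 by omega),
        show ((j : Nat) : Int) + 1 = ((j + 1 : Nat) : Int) by push_cast; ring,
        PySem.List.pyGetD_natCast]

-- the concrete 8-step P8 loop of port A, evaluated on the literal [0,…,0] key
theorem pv_foldP8 (S : List Int) :
    (pvP8.foldl (fun (st : List Int × Int) i =>
      (PySem.List.pySetD st.1 st.2 (PySem.List.pyGetD S (i - 1) (0 : Int)), st.2 + 1))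
      (([0, 0, 0, 0, 0, 0, 0, 0] : List Int), (0 : Int))).1 =
    [PySem.List.pyGetD S 5 0, PySem.List.pyGetD S 2 0, PySem.List.pyGetD S 6 0,
     PySem.List.pyGetD S 3 0, PySem.List.pyGetD S 7 0, PySem.List.pyGetD S 4 0,
     PySem.List.pyGetD S 9 0, PySem.List.pyGetD S 8 0] := by
  norm_num [pvP8, List.foldl_cons, List.foldl_nil, PySem.List.pySetD_of_nonneg, List.set]
  rfl

-- ===== VERDICT (by name: the statement is the Claim_ definition above) =====
theorem ComputeK1_spec : Claim_equal_ComputeK1 := by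
  intro ori _hdom hpre
  unfold Spec_ComputeK1 ComputeK1 ComputeK1_alt
  have hlen : 10 ≤ ori.length := hpre
  simp only []
  rw [pv_foldP8 (pvShift ori 1)]
  simp only [pvP8, List.map_cons, List.map_nil,
    show (6 : Int) - 1 = 5 by norm_num, show (3 : Int) - 1 = 2 by norm_num,
    show (7 : Int) - 1 = 6 by norm_num, show (4 : Int) - 1 = 3 by norm_num,
    show (8 : Int) - 1 = 7 by norm_num, show (5 : Int) - 1 = 4 by norm_num,
    show (10 : Int) - 1 = 9 by norm_num, show (9 : Int) - 1 = 8 by norm_num,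
    PySem.List.pyGetD_ofNat', List.cons.injEq, and_true]
  refine ⟨?_, ?_, ?_, ?_, ?_, ?_, ?_, ?_⟩ <;>
    exact_mod_cast pv_bit ori hlen _ (by norm_num) (by norm_num)
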